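-- pv_equiv track=rewrite | github.com/KKlauden/docchat-mcp | src/docchat/importers/openapi.py | _path_to_resource_key
-- ===== SOURCE A (Python) =====
-- def _path_to_resource_key(path: str) -> str:
--     """Derive a resource key from a URL path.
--
--     Takes the last non-parameter segment.  For multi-segment paths uses
--     ``{parent}-{child}`` to avoid collisions.
--     """
--     # Strip query string just in case
--     path = path.split("?")[0]
--     # Split and filter out empty parts and path params like {id}
--     parts = [p for p in path.strip("/").split("/") if p and not p.startswith("{")]
--     if not parts:
--         return "root"
--     if len(parts) == 1:
--         return parts[0]
--     # Use last two non-param segments to create a qualified key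
--     return f"{parts[-2]}-{parts[-1]}"
-- ===== SOURCE B (Python) =====
-- def _path_to_resource_key(path: str) -> str:
--     # Character-level state machine: one pass over the raw characters, no
--     # split/strip/list building.  Segments are accumulated char by char;
--     # each finished valid segment (nonempty, not starting with '{') shifts
--     # into a two-slot (prev, last) window.  Leading/trailing slashes and
--     # empty segments produce empty buffers which are simply not shifted,
--     # so strip('/') is unnecessary.
--     prev = None
--     last = None
--     cur = []
--     for ch in path:
--         if ch == "?":
--             break
--         if ch == "/":
--             if cur and cur[0] != "{":
--                 prev, last = last, "".join(cur)
--             cur = []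
--         else:
--             cur.append(ch)
--     if cur and cur[0] != "{":
--         prev, last = last, "".join(cur)
--     if last is None:
--         return "root"
--     if prev is None:
--         return last
--     return f"{prev}-{last}"
-- ===== Notes on version B (the rewrite author's own statement) =====
-- stated objective: alternative
-- what changed: Replaces the split/strip/filter-list-then-negative-index pipeline with a single character-level state machine that accumulates segments char by char and shifts each valid finished segment through a two-slot (prev,last) window, never materializing any segment list.
import Mathlib
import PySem

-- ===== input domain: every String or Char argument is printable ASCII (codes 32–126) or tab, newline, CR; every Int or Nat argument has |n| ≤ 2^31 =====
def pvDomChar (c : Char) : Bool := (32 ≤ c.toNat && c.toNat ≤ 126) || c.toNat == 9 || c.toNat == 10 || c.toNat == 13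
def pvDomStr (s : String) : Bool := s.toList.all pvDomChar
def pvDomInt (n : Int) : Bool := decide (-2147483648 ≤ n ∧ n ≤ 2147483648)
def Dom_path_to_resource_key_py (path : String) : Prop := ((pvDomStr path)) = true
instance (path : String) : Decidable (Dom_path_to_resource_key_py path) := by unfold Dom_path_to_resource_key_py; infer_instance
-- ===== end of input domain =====

-- B replaces the split/strip/filter-list-then-negative-index pipeline by a single
-- character-level state machine holding a two-slot (prev, last) segment window
-- (alternative decomposition, same asymptotic cost).

-- ===== PORT A =====
def path_to_resource_key_py (path : String) : String :=
  let path2 := ((PySem.Str.split? path "?").getD []).headD ""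
  let parts := ((PySem.Str.split? (PySem.Str.stripChars path2 "/") "/").getD []).filter
      (fun p => !(p == "") && !(PySem.Str.startswith p "{"))
  if parts = [] then "root"
  else if parts.length = 1 then (PySem.List.pyGet? parts 0).getD ""
  else PySem.Str.join "-" [(PySem.List.pyGet? parts (-2)).getD "", (PySem.List.pyGet? parts (-1)).getD ""]

-- ===== PORT B =====
-- "cur and cur[0] != '{'" — a finished segment buffer is kept only if nonempty and not '{'-led
def pvValid : List Char → Bool
  | [] => false
  | c :: _ => c != '{'

-- "prev, last = last, ''.join(cur)" guarded by pvValid (the flush step of the state machine)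
def pvFlush (cur : List Char) (prev last : Option (List Char)) :
    Option (List Char) × Option (List Char) :=
  if pvValid cur then (last, some cur) else (prev, last)

-- the character loop: break on '?', flush on '/', otherwise extend the buffer
def pvScan : List Char → List Char → Option (List Char) → Option (List Char) →
    Option (List Char) × Option (List Char)
  | [], cur, prev, last => pvFlush cur prev last
  | c :: rest, cur, prev, last =>
    if c = '?' then pvFlush cur prev last
    else if c = '/' then
      match pvFlush cur prev last with
      | (p, l) => pvScan rest [] p l
    else pvScan rest (cur ++ [c]) prev last

def path_to_resource_key_py_alt (path : String) : String :=
  match pvScan path.toList [] none none with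
  | (_, none) => "root"
  | (none, some last) => String.ofList last
  | (some prev, some last) => String.ofList (prev ++ '-' :: last)

-- ===== PRECONDITION & SPEC =====
def Spec_path_to_resource_key_py (path : String) (out : String) : Prop := out = path_to_resource_key_py_alt path
instance (path : String) (out : String) : Decidable (Spec_path_to_resource_key_py path out) := by unfold Spec_path_to_resource_key_py; infer_instance

-- ===== CLAIM (what is proved, stated in full; the proofs are below) =====
def Claim_equal_path_to_resource_key_py : Prop := ∀ (path : String), Dom_path_to_resource_key_py path → Spec_path_to_resource_key_py path (path_to_resource_key_py path)

-- ===== LEMMAS AND PROOFS =====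
def pvSplitc (c : Char) : List Char → List (List Char)
  | [] => [[]]
  | a :: rest =>
    if a = c then [] :: pvSplitc c rest
    else
      match pvSplitc c rest with
      | [] => [[a]]
      | s :: ss => (a :: s) :: ss
theorem pvSplitc_ne_nil (c : Char) (l : List Char) : pvSplitc c l ≠ [] := by
  cases l with
  | nil => simp [pvSplitc]
  | cons a rest =>
    simp only [pvSplitc]
    split_ifs with h
    · simp
    · cases pvSplitc c rest <;> simp
def pvPrepend (x : List Char) : List (List Char) → List (List Char)
  | [] => [x]
  | s :: ss => (x ++ s) :: ss
theorem pvGo_spec (c : Char) : ∀ (fuel : Nat) (l cur : List Char) (acc : List (List Char)),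
    l.length ≤ fuel →
    PySem.Chars.splitOn.go [c] fuel l cur acc
      = acc.reverse ++ pvPrepend cur.reverse (pvSplitc c l) := by
  intro fuel
  induction fuel with
  | zero =>
    intro l cur acc h
    have : l = [] := by cases l <;> simp_all
    subst this
    simp [PySem.Chars.splitOn.go, pvSplitc, pvPrepend]
  | succ n ih =>
    intro l cur acc h
    cases l with
    | nil => simp [PySem.Chars.splitOn.go, pvSplitc, pvPrepend]
    | cons a rest =>
      by_cases hac : a = c
      · have hpre : [c].isPrefixOf (a :: rest) = true := by simp [List.isPrefixOf, hac]
        rw [PySem.Chars.splitOn.go]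
        simp only [hpre, if_true, List.length_cons, List.length_nil, List.drop_succ_cons, List.drop_zero]
        rw [ih rest [] (cur.reverse :: acc) (by simpa using Nat.le_of_succ_le_succ h)]
        have h1 : pvSplitc c (a :: rest) = [] :: pvSplitc c rest := by simp [pvSplitc, hac]
        rw [h1]
        rcases hs : pvSplitc c rest with _ | ⟨s, ss⟩
        · exact absurd hs (pvSplitc_ne_nil c rest)
        · simp [pvPrepend]
      · have hpre : [c].isPrefixOf (a :: rest) = false := by
          simp [List.isPrefixOf]
          intro h'; exact absurd h'.symm hac
        rw [PySem.Chars.splitOn.go]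
        simp only [hpre, Bool.false_eq_true, if_false]
        rw [ih rest (a :: cur) acc (by simpa using Nat.le_of_succ_le_succ h)]
        have h1 : pvSplitc c (a :: rest) =
            match pvSplitc c rest with
            | [] => [[a]]
            | s :: ss => (a :: s) :: ss := by
          simp [pvSplitc, hac]
        rw [h1]
        rcases hs : pvSplitc c rest with _ | ⟨s, ss⟩
        · exact absurd hs (pvSplitc_ne_nil c rest)
        · simp [pvPrepend]
theorem pvSplitOn_eq (c : Char) (l : List Char) :
    PySem.Chars.splitOn l [c] = pvSplitc c l := by
  rw [PySem.Chars.splitOn, pvGo_spec c (l.length+1) l [] [] (by omega)]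
  rcases hs : pvSplitc c l with _ | ⟨s, ss⟩
  · exact absurd hs (pvSplitc_ne_nil c l)
  · simp [pvPrepend]
theorem pvSplitc_head (c : Char) (l : List Char) :
    (pvSplitc c l).head? = some (l.takeWhile (fun a => a != c)) := by
  induction l with
  | nil => simp [pvSplitc]
  | cons a rest ih =>
    by_cases hac : a = c
    · simp [pvSplitc, hac, List.takeWhile]
    · simp only [pvSplitc, if_neg hac]
      rcases hs : pvSplitc c rest with _ | ⟨s, ss⟩
      · exact absurd hs (pvSplitc_ne_nil c rest)
      · rw [hs] at ih
        simp only [List.head?, Option.some_inj] at ih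
        have hb : (a != c) = true := by simp [bne, hac]
        simp [List.takeWhile_cons, hb, ih]
theorem pvTakeWhile_snoc (c : Char) (l : List Char) :
    (l ++ [c]).takeWhile (fun a => a != c) = l.takeWhile (fun a => a != c) := by
  induction l with
  | nil => simp [List.takeWhile_cons]
  | cons x xs ih =>
    simp only [List.cons_append, List.takeWhile_cons]
    cases hx : x != c <;> simp [ih]
theorem pvFilter_snoc (c : Char) (l : List Char) :
    (pvSplitc c (l ++ [c])).filter (fun s => !s.isEmpty)
      = (pvSplitc c l).filter (fun s => !s.isEmpty) := by
  induction l with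
  | nil => simp [pvSplitc]
  | cons a rest ih =>
    by_cases hac : a = c
    · simpa [pvSplitc, hac] using ih
    · simp only [List.cons_append, pvSplitc, if_neg hac]
      rcases h1 : pvSplitc c (rest ++ [c]) with _ | ⟨s, ss⟩
      · exact absurd h1 (pvSplitc_ne_nil c _)
      rcases h2 : pvSplitc c rest with _ | ⟨s', ss'⟩
      · exact absurd h2 (pvSplitc_ne_nil c _)
      have hh : s = s' := by
        have e1 := pvSplitc_head c (rest ++ [c])
        have e2 := pvSplitc_head c rest
        rw [h1] at e1; rw [h2] at e2
        simp only [List.head?] at e1 e2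
        rw [pvTakeWhile_snoc] at e1
        rw [Option.some_inj.mp e1, Option.some_inj.mp e2]
      subst hh
      rw [h1, h2] at ih
      simp only [List.filter_cons] at ih ⊢
      cases hse : (!s.isEmpty) <;> simp_all
theorem pvFilter_dropWhile (c : Char) (l : List Char) :
    (pvSplitc c (l.dropWhile (fun a => a == c))).filter (fun s => !s.isEmpty)
      = (pvSplitc c l).filter (fun s => !s.isEmpty) := by
  induction l with
  | nil => simp
  | cons a rest ih =>
    by_cases hac : a = c
    · simpa [List.dropWhile, hac, pvSplitc] using ih
    · have hf : (a == c) = false := by simp [hac]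
      simp [List.dropWhile_cons, hf]
theorem pvFilter_rdropWhile (c : Char) (l : List Char) :
    (pvSplitc c (l.rdropWhile (fun a => a == c))).filter (fun s => !s.isEmpty)
      = (pvSplitc c l).filter (fun s => !s.isEmpty) := by
  induction l using List.reverseRecOn with
  | nil => simp [List.rdropWhile]
  | append_singleton xs x ih =>
    by_cases hx : x = c
    · rw [hx, List.rdropWhile_concat_pos _ _ _ (by simp), ih, pvFilter_snoc]
    · rw [List.rdropWhile_concat_neg _ _ _ (by simp [hx])]
theorem pvFilter_strip (l : List Char) :
    (pvSplitc '/' (PySem.Chars.stripChars l ['/'])).filter (fun s => !s.isEmpty)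
      = (pvSplitc '/' l).filter (fun s => !s.isEmpty) := by
  have hp : (fun c => List.contains ['/'] c) = (fun a => a == '/') := by
    funext a
    cases h : a == '/' with
    | true => simp_all
    | false =>
      have : ¬ a = '/' := by simpa using h
      simp [List.contains_cons, this, fun e => this (Eq.symm e)]
  rw [PySem.Chars.stripChars]
  rw [show (List.dropWhile (fun c => List.contains ['/'] c)
      (List.dropWhile (fun c => List.contains ['/'] c) l).reverse).reverse
      = List.rdropWhile (fun a => a == '/') (List.dropWhile (fun a => a == '/') l) from by
    rw [List.rdropWhile, hp]]
  rw [pvFilter_rdropWhile, pvFilter_dropWhile]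
def pvShift (st : Option (List Char) × Option (List Char)) (s : List Char) :
    Option (List Char) × Option (List Char) :=
  if pvValid s then (st.2, some s) else st
theorem pvScan_takeWhile (l : List Char) : ∀ (cur : List Char) (p q : Option (List Char)),
    pvScan l cur p q = pvScan (l.takeWhile (fun a => a != '?')) cur p q := by
  induction l with
  | nil => intro cur p q; rfl
  | cons c rest ih =>
    intro cur p q
    by_cases hc : c = '?'
    · simp [pvScan, hc, List.takeWhile_cons]
    · have hb : (c != '?') = true := by simp [bne, hc]
      rw [show (c :: rest).takeWhile (fun a => a != '?') = c :: rest.takeWhile (fun a => a != '?')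
        from by simp [List.takeWhile_cons, hb]]
      by_cases hs : c = '/'
      · simp only [pvScan, if_neg hc, if_pos hs]
        cases pvFlush cur p q with
        | mk a b => exact ih [] a b
      · simp only [pvScan, if_neg hc, if_neg hs]
        exact ih (cur ++ [c]) p q
theorem pvFlush_eq_shift (cur : List Char) (p q : Option (List Char)) :
    pvFlush cur p q = pvShift (p, q) cur := rfl
theorem pvScan_noq (l : List Char) (hq : '?' ∉ l) :
    ∀ (cur : List Char) (p q : Option (List Char)),
    pvScan l cur p q = List.foldl pvShift (p, q) (pvPrepend cur (pvSplitc '/' l)) := by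
  induction l with
  | nil =>
    intro cur p q
    simp [pvScan, pvSplitc, pvPrepend, pvFlush_eq_shift]
  | cons c rest ih =>
    intro cur p q
    have hc : c ≠ '?' := fun h => hq (h ▸ List.mem_cons_self)
    have hrest : '?' ∉ rest := fun h => hq (List.mem_cons_of_mem _ h)
    by_cases hs : c = '/'
    · simp only [pvScan, if_neg hc, if_pos hs, pvFlush_eq_shift]
      rw [ih hrest [] (pvShift (p, q) cur).1 (pvShift (p, q) cur).2]
      have h1 : pvSplitc '/' (c :: rest) = [] :: pvSplitc '/' rest := by simp [pvSplitc, hs]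
      rw [h1]
      rcases h2 : pvSplitc '/' rest with _ | ⟨s, ss⟩
      · exact absurd h2 (pvSplitc_ne_nil _ _)
      · simp [pvPrepend]
    · simp only [pvScan, if_neg hc, if_neg hs]
      rw [ih hrest (cur ++ [c]) p q]
      have h1 : pvSplitc '/' (c :: rest) =
          match pvSplitc '/' rest with
          | [] => [[c]]
          | s :: ss => (c :: s) :: ss := by simp [pvSplitc, hs]
      rw [h1]
      rcases h2 : pvSplitc '/' rest with _ | ⟨s, ss⟩
      · exact absurd h2 (pvSplitc_ne_nil _ _)
      · simp [pvPrepend]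
theorem pvFoldl_filter (F : List (List Char)) : ∀ st,
    List.foldl pvShift st F = List.foldl pvShift st (F.filter pvValid) := by
  induction F with
  | nil => intro st; rfl
  | cons x rest ih =>
    intro st
    by_cases hx : pvValid x = true
    · simp [List.filter_cons, hx, List.foldl_cons, ih]
    · have : pvShift st x = st := by simp [pvShift, hx]
      simp [List.filter_cons, Bool.eq_false_iff.mpr hx, List.foldl_cons, this, ih]
theorem pvFoldl_spec (F : List (List Char)) (hv : ∀ s ∈ F, pvValid s = true) : ∀ st,
    List.foldl pvShift st F =
      match F.reverse with
      | [] => st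
      | [a] => (st.2, some a)
      | a :: b :: _ => (some b, some a) := by
  induction F with
  | nil => intro st; rfl
  | cons x rest ih =>
    intro st
    have hx : pvValid x = true := hv x List.mem_cons_self
    have hrest : ∀ s ∈ rest, pvValid s = true := fun s hs => hv s (List.mem_cons_of_mem _ hs)
    rw [List.foldl_cons, show pvShift st x = (st.2, some x) from by simp [pvShift, hx],
      ih hrest]
    rcases hr : rest.reverse with _ | ⟨a, t⟩
    · have : rest = [] := by simpa using congrArg List.reverse hr
      simp [this, String.ofList_append]
    · rcases t with _ | ⟨b, t'⟩
      · have : rest = [a] := by simpa using congrArg List.reverse hr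
        simp [this, String.ofList_append]
      · have hrev : (x :: rest).reverse = a :: b :: (t' ++ [x]) := by
          simp [hr]
        rw [hrev]
theorem pvValid_eq (s : List Char) : pvValid s = (!s.isEmpty && (s.headD '{' != '{')) := by
  cases s <;> simp [pvValid]
set_option maxRecDepth 16384 in
theorem pvValid_str (s : List Char) :
    (!(String.ofList s == "") && !(PySem.Str.startswith (String.ofList s) "{")) = pvValid s := by
  cases s with
  | nil => rfl
  | cons a t =>
    simp only [pvValid, PySem.Str.startswith, String.toList_ofList]
    have hne : String.ofList (a :: t) ≠ "" := by
      intro e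
      have h2 := congrArg String.toList e
      simp only [String.toList_ofList] at h2
      cases h2
    rw [beq_eq_false_iff_ne.mpr hne]
    simp [PySem.Chars.startswith, List.isPrefixOf, bne, eq_comm]


-- ===== VERDICT (by name: the statement is the Claim_ definition above) =====
set_option maxRecDepth 16384 in
theorem path_to_resource_key_py_spec : Claim_equal_path_to_resource_key_py := by
  intro path _
  unfold Spec_path_to_resource_key_py path_to_resource_key_py path_to_resource_key_py_alt
  simp only []
  set L := path.toList with hL
  set pre := L.takeWhile (fun a => a != '?') with hpre
  -- A side: path2
  have hsplitq : PySem.Str.split? path "?" = some ((pvSplitc '?' L).map String.ofList) := by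
    rw [PySem.Str.split?]
    rw [show ("?" : String).toList = ['?'] from rfl]
    rw [PySem.Chars.split?]
    simp [pvSplitOn_eq, hL]
  have hpath2 : ((PySem.Str.split? path "?").getD []).headD "" = String.ofList pre := by
    rw [hsplitq]
    rcases hs : pvSplitc '?' L with _ | ⟨s, ss⟩
    · exact absurd hs (pvSplitc_ne_nil _ _)
    · have := pvSplitc_head '?' L
      rw [hs] at this
      simp only [List.head?, Option.some_inj] at this
      simp [this, hpre]
  rw [hpath2]
  -- A side: parts
  set strip := PySem.Chars.stripChars pre ['/'] with hstrip
  have hstripS : PySem.Str.stripChars (String.ofList pre) "/" = String.ofList strip := by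
    rw [PySem.Str.stripChars, String.toList_ofList]; rfl
  rw [hstripS]
  have hsplit2 : PySem.Str.split? (String.ofList strip) "/"
      = some ((pvSplitc '/' strip).map String.ofList) := by
    rw [PySem.Str.split?, String.toList_ofList]
    rw [show ("/" : String).toList = ['/'] from rfl]
    rw [PySem.Chars.split?]
    simp [pvSplitOn_eq]
  rw [hsplit2]
  simp only [Option.getD_some]
  have hfm : ∀ (LL : List (List Char)),
      (LL.map String.ofList).filter (fun p => !(p == "") && !(PySem.Str.startswith p "{"))
        = (LL.filter pvValid).map String.ofList := by
    intro LL
    rw [List.filter_map]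
    congr 1
    apply List.filter_congr
    intro s _
    simpa [Function.comp] using pvValid_str s
  rw [hfm]
  -- the strip is invisible after filtering out empty segments
  have hswap : ∀ (l : List (List Char)), List.filter pvValid l
      = List.filter (fun s => s.headD '{' != '{') (List.filter (fun s => !s.isEmpty) l) := by
    intro l
    rw [List.filter_filter]
    apply List.filter_congr
    intro s _
    rw [pvValid_eq, Bool.and_comm]
  have hFs : (pvSplitc '/' strip).filter pvValid = (pvSplitc '/' pre).filter pvValid := by
    rw [hswap, hswap, hstrip, pvFilter_strip]
  rw [hFs]
  set F := (pvSplitc '/' pre).filter pvValid with hF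
  -- B side: reduce the scan to the same filtered segment list
  have hq : '?' ∉ pre := by
    intro h
    have := List.mem_takeWhile_imp h
    simp [bne] at this
  have hscan : pvScan L [] none none =
      match F.reverse with
      | [] => ((none : Option (List Char)), (none : Option (List Char)))
      | [a] => (none, some a)
      | a :: b :: _ => (some b, some a) := by
    rw [pvScan_takeWhile, ← hpre, pvScan_noq pre hq]
    have hprep : pvPrepend [] (pvSplitc '/' pre) = pvSplitc '/' pre := by
      rcases hs : pvSplitc '/' pre with _ | ⟨s, ss⟩
      · exact absurd hs (pvSplitc_ne_nil _ _)
      · simp [pvPrepend]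
    rw [hprep, pvFoldl_filter, ← hF,
      pvFoldl_spec F (fun s hs => (List.mem_filter.mp hs).2) (none, none)]
  rw [hscan]
  rcases hr : F.reverse with _ | ⟨a, t⟩
  · have hFe : F = [] := by simpa using congrArg List.reverse hr
    simp [hFe]
  rcases t with _ | ⟨b, t'⟩
  · have hFe : F = [a] := by simpa using congrArg List.reverse hr
    simp [hFe, PySem.List.pyGet?, PySem.List.pyIdx?]
  · have hFe : F = t'.reverse ++ [b, a] := by
      have := congrArg List.reverse hr
      simpa using this
    have hmap : F.map String.ofList = t'.reverse.map String.ofList ++ [String.ofList b, String.ofList a] := by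
      simp [hFe]
    have hne : F.map String.ofList ≠ [] := by simp [hmap]
    have hlen : (F.map String.ofList).length = t'.length + 2 := by simp [hmap]
    have hlast : PySem.List.pyGet? (F.map String.ofList) (-1) = some (String.ofList a) := by
      rw [PySem.List.pyGet?_neg_one, hmap]
      simp [List.getLast?_append]
    have hpen : PySem.List.pyGet? (F.map String.ofList) (-2) = some (String.ofList b) := by
      rw [PySem.List.pyGet?_neg_ofNat (F.map String.ofList) 2 (by omega) (by omega), hmap]
      rw [show (List.map String.ofList t'.reverse ++ [String.ofList b, String.ofList a]).length - 2
          = (List.map String.ofList t'.reverse).length by simp]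
      rw [List.getElem?_append_right (le_refl _)]
      simp
    simp only [hne, if_neg, hlen]
    rw [if_neg (by simp [hne]), if_neg (by omega)]
    rw [hlast, hpen]
    simp only [Option.getD_some]
    rw [PySem.Str.join]
    have : PySem.Chars.join ['-'] [b, a] = b ++ '-' :: a := by
      rw [PySem.Chars.join_cons_cons, PySem.Chars.join_singleton]
      simp
    simp [this, String.ofList_append]
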